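-- pv_equiv track=rewrite | github.com/Drakjoakas/mls_analysis | mls_analysis.py | sort_to_plot
-- ===== SOURCE A (Python) =====
-- def sort_to_plot(base_x_axis, base_y_axis):
--     """Sorts points to plot them
--
--     Args:
--         base_x_axis (list): list of x axis
--         base_y_axis (list): list of y axis
--
--     Returns:
--         list, list: list of sorted points for each axis
--     """
--     x_axis = list()
--     y_axis = list()
--     to_sort_list = list()
--     for index in range(len(base_x_axis)):
--         to_sort_list.append([base_x_axis[index], base_y_axis[index]])
--     sorted_list = sorted(to_sort_list, key=lambda elem: elem[0])
--     for index in range(len(base_x_axis)):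
--         x_axis.append(sorted_list[index][0])
--         y_axis.append(sorted_list[index][1])
--     return x_axis, y_axis
-- ===== SOURCE B (Python) =====
-- def sort_to_plot(base_x_axis, base_y_axis):
--     """Sorts points to plot them (stable insertion sort on parallel lists).
--
--     Instead of zipping into pairs and calling the library sort, each (x, y)
--     is inserted online into two parallel output lists: the insertion position
--     is the first slot whose x value exceeds the new x (so equal x values keep
--     their original order, exactly as Python's stable sort does).
--     """
--     x_axis = []
--     y_axis = []
--     for x, y in zip(base_x_axis, base_y_axis):
--         pos = 0
--         while pos < len(x_axis) and x_axis[pos] <= x: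
--             pos += 1
--         x_axis.insert(pos, x)
--         y_axis.insert(pos, y)
--     return x_axis, y_axis
-- ===== Notes on version B (the rewrite author's own statement) =====
-- stated objective: alternative
-- what changed: B never builds a pair list and never calls the library sort: it is an online stable insertion sort that maintains two parallel sorted output lists, inserting each (x, y) at the first position whose x value exceeds the new x; A builds a coupled [x,y] list, library-sorts it, and unzips it with an index loop.
import Mathlib
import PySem

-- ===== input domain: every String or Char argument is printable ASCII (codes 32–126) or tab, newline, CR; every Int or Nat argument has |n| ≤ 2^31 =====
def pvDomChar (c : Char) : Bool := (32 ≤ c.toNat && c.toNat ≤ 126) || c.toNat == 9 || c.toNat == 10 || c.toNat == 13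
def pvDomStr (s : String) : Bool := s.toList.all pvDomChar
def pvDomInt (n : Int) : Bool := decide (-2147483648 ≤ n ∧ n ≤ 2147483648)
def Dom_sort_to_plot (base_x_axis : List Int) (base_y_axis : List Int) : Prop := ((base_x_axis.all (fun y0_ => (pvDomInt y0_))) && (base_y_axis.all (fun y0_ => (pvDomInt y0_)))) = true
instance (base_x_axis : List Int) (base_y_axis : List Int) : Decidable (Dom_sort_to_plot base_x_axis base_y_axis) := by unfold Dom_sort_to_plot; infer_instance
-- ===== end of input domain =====

-- B replaces A's build-pairs / library-sort / unzip pipeline by an online stable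
-- insertion sort maintaining two parallel sorted lists (alternative algorithm);
-- where A raises IndexError (base_y_axis shorter) B returns the truncated result.


-- ===== PORT A =====
def sort_to_plot (base_x_axis : List Int) (base_y_axis : List Int) : List Int × List Int :=
  -- to_sort_list.append([base_x_axis[index], base_y_axis[index]]) for index in range(len(base_x_axis))
  let to_sort_list : List (Int × Int) :=
    (PySem.List.pyRange 0 (PySem.List.len base_x_axis)).foldl
      (fun acc i => acc ++ [(PySem.List.pyGetD base_x_axis i 0, PySem.List.pyGetD base_y_axis i 0)]) []
  -- sorted(to_sort_list, key=lambda elem: elem[0])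
  let sorted_list := PySem.List.sorted to_sort_list (fun elem => elem.1)
  -- second loop: x_axis.append(sorted_list[index][0]); y_axis.append(sorted_list[index][1])
  (PySem.List.pyRange 0 (PySem.List.len base_x_axis)).foldl
    (fun s i => (s.1 ++ [(PySem.List.pyGetD sorted_list i (0, 0)).1],
                 s.2 ++ [(PySem.List.pyGetD sorted_list i (0, 0)).2])) ([], [])

-- ===== PORT B =====
-- the while loop 'pos = 0; while pos < len(x_axis) and x_axis[pos] <= x: pos += 1',
-- walking the existing sorted list left to right (indices stay in range throughout)
def bPos (xs : List Int) (x : Int) : Nat :=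
  match xs with
  | [] => 0
  | a :: t => if a ≤ x then bPos t x + 1 else 0

def sort_to_plot_alt (base_x_axis : List Int) (base_y_axis : List Int) : List Int × List Int :=
  -- for x, y in zip(base_x_axis, base_y_axis): find pos, insert into both lists
  (base_x_axis.zip base_y_axis).foldl
    (fun s p =>
      let pos := bPos s.1 p.1
      (s.1.insertIdx pos p.1, s.2.insertIdx pos p.2)) ([], [])

-- ===== PRECONDITION & SPEC =====
-- Pre_ excludes exactly the inputs where Python A raises IndexError:
-- base_y_axis shorter than base_x_axis.
def Pre_sort_to_plot (base_x_axis : List Int) (base_y_axis : List Int) : Prop :=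
  base_x_axis.length ≤ base_y_axis.length
instance (base_x_axis : List Int) (base_y_axis : List Int) : Decidable (Pre_sort_to_plot base_x_axis base_y_axis) := by unfold Pre_sort_to_plot; infer_instance
def pvWitness_sort_to_plot : List Int × List Int := ([3, 1, 2], [30, 10, 20])

def Spec_sort_to_plot (base_x_axis : List Int) (base_y_axis : List Int) (out : List Int × List Int) : Prop := out = sort_to_plot_alt base_x_axis base_y_axis
instance (base_x_axis : List Int) (base_y_axis : List Int) (out : List Int × List Int) : Decidable (Spec_sort_to_plot base_x_axis base_y_axis out) := by unfold Spec_sort_to_plot; infer_instance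

-- ===== CLAIM (what is proved, stated in full; the proofs are below) =====
def Claim_equal_sort_to_plot : Prop := ∀ (base_x_axis : List Int) (base_y_axis : List Int), Dom_sort_to_plot base_x_axis base_y_axis → Pre_sort_to_plot base_x_axis base_y_axis → Spec_sort_to_plot base_x_axis base_y_axis (sort_to_plot base_x_axis base_y_axis)

-- ===== LEMMAS AND PROOFS =====

-- B's positional insert into the two parallel lists coincides with insertBy
-- (keyed on the first component) on the paired list.
theorem insertIdx_bPos_eq_insertBy (L : List (Int × Int)) (x y : Int) :
    ((L.map Prod.fst).insertIdx (bPos (L.map Prod.fst) x) x,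
     (L.map Prod.snd).insertIdx (bPos (L.map Prod.fst) x) y)
      = ((PySem.List.insertBy (fun a b => decide (a.1 < b.1)) (x, y) L).map Prod.fst,
         (PySem.List.insertBy (fun a b => decide (a.1 < b.1)) (x, y) L).map Prod.snd) := by
  induction L with
  | nil => rfl
  | cons p t ih =>
    simp only [List.map_cons, bPos, PySem.List.insertBy]
    by_cases h : p.1 ≤ x
    · have h' : ¬ x < p.1 := not_lt.mpr h
      have h1 := congrArg Prod.fst ih
      have h2 := congrArg Prod.snd ih
      simp only at h1 h2
      simp [h, h', List.insertIdx_succ_cons, h1, h2]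
    · have h' : x < p.1 := not_le.mp h
      simp [h, h']

-- B's fold over the zipped input, started from the components of an accumulator
-- pair list L, is the componentwise image of the insertBy fold over L.
theorem fold_pair (ps : List (Int × Int)) (L : List (Int × Int)) :
    ps.foldl (fun s p =>
        (s.1.insertIdx (bPos s.1 p.1) p.1, s.2.insertIdx (bPos s.1 p.1) p.2))
      (L.map Prod.fst, L.map Prod.snd)
      = ((ps.foldl (fun acc q => PySem.List.insertBy (fun a b => decide (a.1 < b.1)) q acc) L).map Prod.fst,
         (ps.foldl (fun acc q => PySem.List.insertBy (fun a b => decide (a.1 < b.1)) q acc) L).map Prod.snd) := by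
  induction ps generalizing L with
  | nil => rfl
  | cons p t ih =>
    simp only [List.foldl_cons]
    rw [show ((L.map Prod.fst).insertIdx (bPos (L.map Prod.fst) p.1) p.1,
         (L.map Prod.snd).insertIdx (bPos (L.map Prod.fst) p.1) p.2)
        = ((PySem.List.insertBy (fun a b => decide (a.1 < b.1)) p L).map Prod.fst,
           (PySem.List.insertBy (fun a b => decide (a.1 < b.1)) p L).map Prod.snd)
      from insertIdx_bPos_eq_insertBy L p.1 p.2]
    exact ih _

-- A's first loop builds exactly the zipped list (under Pre_).
theorem to_sort_eq_zip (x y : List Int) (h : x.length ≤ y.length) :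
    (PySem.List.pyRange 0 (PySem.List.len x)).map
        (fun i => (PySem.List.pyGetD x i 0, PySem.List.pyGetD y i 0))
      = x.zip y := by
  rw [PySem.List.len_eq, PySem.List.pyRange_zero_natCast, List.map_map]
  simp only [Function.comp_def, PySem.List.pyGetD_natCast]
  apply List.ext_getElem
  · simp [List.length_zip]; omega
  · intro k h1 h2
    simp only [List.length_map, List.length_range] at h1
    simp [List.getElem_zip, List.getElem?_eq_getElem h1,
      List.getElem?_eq_getElem (lt_of_lt_of_le h1 h)]

theorem sort_to_plot_spec : Claim_equal_sort_to_plot := by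
  intro x y _ hpre
  unfold Pre_sort_to_plot at hpre
  unfold Spec_sort_to_plot sort_to_plot sort_to_plot_alt
  simp only [PySem.List.foldl_append_singleton_eq_map, List.nil_append]
  rw [to_sort_eq_zip x y hpre]
  set S := PySem.List.sorted (x.zip y) (fun elem => elem.1) with hS
  have hlen : PySem.List.len x = PySem.List.len S := by
    have h2 : S.length = (x.zip y).length := by simp [hS, PySem.List.length_sorted]
    simp only [PySem.List.len_eq, h2, List.length_zip]
    omega
  rw [PySem.List.foldl_prod_mk
        (f := fun (l : List Int) (i : Int) => l ++ [(PySem.List.pyGetD S i (0, 0)).1])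
        (g := fun (l : List Int) (i : Int) => l ++ [(PySem.List.pyGetD S i (0, 0)).2]), hlen, PySem.List.foldl_append_singleton_eq_map,
    PySem.List.foldl_append_singleton_eq_map, List.nil_append, List.nil_append,
    show (fun i => (PySem.List.pyGetD S i (0, 0)).1)
        = (fun p => p.1) ∘ (fun i => PySem.List.pyGetD S i (0, 0)) from rfl,
    show (fun i => (PySem.List.pyGetD S i (0, 0)).2)
        = (fun p => p.2) ∘ (fun i => PySem.List.pyGetD S i (0, 0)) from rfl,
    ← List.map_map, ← List.map_map, PySem.List.map_pyGetD_pyRange_zero S (0, 0)]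
  rw [show (([] : List Int), ([] : List Int))
        = (([] : List (Int × Int)).map Prod.fst, ([] : List (Int × Int)).map Prod.snd) from rfl,
    fold_pair (x.zip y) []]
  rw [hS, PySem.List.sorted_eq_foldl_insertBy]

-- ===== VERDICT (by name: the statement is the Claim_ definition above) =====
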